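-- pv_equiv track=rewrite | github.com/vishruthb/random | hackerearth/max_borders.py | get_max_border
-- ===== SOURCE A (Python) =====
-- def get_max_border(matrix):
--     rows = len(matrix)
--     cols = len(matrix[0])
--     max_border = 0
--
--     # Check for maximum border in rows
--     for i in range(rows):
--         j = 0
--         while j < cols:
--             if matrix[i][j] == "#":
--                 count = 1
--                 j += 1
--                 while j < cols and matrix[i][j] == "#":
--                     count += 1
--                     j += 1
--                 max_border = max(max_border, count)
--             else:
--                 j += 1
--
--     # Check for maximum border in columns
--     for j in range(cols):
--         i = 0
--         while i < rows:
--             if matrix[i][j] == "#":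
--                 count = 1
--                 i += 1
--                 while i < rows and matrix[i][j] == "#":
--                     count += 1
--                     i += 1
--                 max_border = max(max_border, count)
--             else:
--                 i += 1
--
--     return max_border
-- ===== SOURCE B (Python) =====
-- def get_max_border(matrix):
--     rows = len(matrix)
--     cols = len(matrix[0])
--     lines = [[matrix[i][j] for j in range(cols)] for i in range(rows)]
--     lines += [[matrix[i][j] for i in range(rows)] for j in range(cols)]
--     best = 0
--     for line in lines:
--         # positions of the non-'#' separators, with sentinels on both ends:
--         # the longest '#' segment is the largest gap between consecutive separators, minus one
--         stops = [-1] + [k for k, cell in enumerate(line) if cell != "#"] + [len(line)]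
--         for a, b in zip(stops, stops[1:]):
--             best = max(best, b - a - 1)
--     return best
-- ===== Notes on version B (the rewrite author's own statement) =====
-- stated objective: alternative
-- what changed: Instead of extracting each maximal '#' run with nested while loops, B computes for every line the list of separator positions (indices of non-'#' cells, with -1 and len sentinels) and takes the maximum gap between consecutive separators minus one.
import Mathlib
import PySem

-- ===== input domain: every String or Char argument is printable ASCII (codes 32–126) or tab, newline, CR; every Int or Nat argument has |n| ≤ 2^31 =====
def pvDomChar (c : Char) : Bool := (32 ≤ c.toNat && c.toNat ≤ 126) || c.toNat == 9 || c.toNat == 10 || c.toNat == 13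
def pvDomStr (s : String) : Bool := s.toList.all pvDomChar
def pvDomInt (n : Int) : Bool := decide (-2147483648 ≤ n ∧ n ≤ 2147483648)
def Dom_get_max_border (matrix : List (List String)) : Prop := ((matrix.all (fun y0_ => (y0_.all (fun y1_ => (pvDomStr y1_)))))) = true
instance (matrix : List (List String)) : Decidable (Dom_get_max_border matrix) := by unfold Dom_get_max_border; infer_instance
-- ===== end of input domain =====

-- B replaces A's nested-while run extraction by separator positions: per line it lists the
-- indices of non-'#' cells (with -1/len sentinels) and takes the max gap minus one; objective: alternative.

-- ===== PORT A =====
-- inner `while j < cols and matrix[i][j] == "#"`: consumes the leading '#' cells, returns count and the rest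
def runA : List String → Int → Int × List String
  | [], count => (count, [])
  | c :: rest, count => if c == "#" then runA rest (count + 1) else (count, c :: rest)

lemma runA_len (cells : List String) (count : Int) : (runA cells count).2.length ≤ cells.length := by
  induction cells generalizing count with
  | nil => simp [runA]
  | cons c rest ih =>
    simp only [runA]
    split
    · exact le_trans (ih _) (by simp)
    · simp

-- outer `while j < cols` loop of A over one line of cells, threading max_border
def scanA : List String → Int → Int
  | [], m => m
  | c :: rest, m =>
    if c == "#" then
      let p := runA rest 1
      scanA p.2 (max m p.1)
    else scanA rest m
termination_by cells _ => cells.length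
decreasing_by
  · have := runA_len rest 1; simp; omega
  · simp

def get_max_border (matrix : List (List String)) : Int :=
  let rows := matrix.length
  let cols := (matrix.headD []).length
  let afterRows := (List.range rows).foldl
    (fun m i => scanA ((List.range cols).map (fun j => (matrix.getD i []).getD j "")) m) 0
  (List.range cols).foldl
    (fun m j => scanA ((List.range rows).map (fun i => (matrix.getD i []).getD j "")) m) afterRows

-- ===== PORT B =====
-- body of B's `for line in lines` loop: separator positions with sentinels, max gap − 1
def lineBestB (best : Int) (line : List String) : Int :=
  let stops : List Int := -1 ::
    ((PySem.List.enumerate line 0).filterMap (fun p => if p.2 = "#" then none else some p.1))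
    ++ [(line.length : Int)]
  (stops.zip stops.tail).foldl (fun b p => max b (p.2 - p.1 - 1)) best

def get_max_border_alt (matrix : List (List String)) : Int :=
  let rows := matrix.length
  let cols := (matrix.headD []).length
  let lines := (List.range rows).map (fun i => (List.range cols).map (fun j => (matrix.getD i []).getD j ""))
      ++ (List.range cols).map (fun j => (List.range rows).map (fun i => (matrix.getD i []).getD j ""))
  lines.foldl lineBestB 0

-- ===== PRECONDITION & SPEC =====
-- Pre_ excludes exactly the inputs where Python A raises IndexError: the empty matrix
-- (matrix[0]) and jagged matrices with a row shorter than the first row (matrix[i][j]).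
def Pre_get_max_border (matrix : List (List String)) : Prop :=
  matrix ≠ [] ∧ ∀ row ∈ matrix, (matrix.headD []).length ≤ row.length
instance (matrix : List (List String)) : Decidable (Pre_get_max_border matrix) := by
  unfold Pre_get_max_border; infer_instance

def pvWitness_get_max_border : List (List String) := [["#", "."], [".", "#"]]

def Spec_get_max_border (matrix : List (List String)) (out : Int) : Prop := out = get_max_border_alt matrix
instance (matrix : List (List String)) (out : Int) : Decidable (Spec_get_max_border matrix out) := by unfold Spec_get_max_border; infer_instance

-- ===== CLAIM (what is proved, stated in full; the proofs are below) =====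
def Claim_equal_get_max_border : Prop := ∀ (matrix : List (List String)), Dom_get_max_border matrix → Pre_get_max_border matrix → Spec_get_max_border matrix (get_max_border matrix)

-- ===== LEMMAS AND PROOFS =====

-- indices (from offset off) of the non-'#' cells of a line
def idxs : List String → Int → List Int
  | [], _ => []
  | c :: rest, off => if c = "#" then idxs rest (off + 1) else off :: idxs rest (off + 1)

lemma enum_filter (cells : List String) (s : Int) :
    (PySem.List.enumerate cells s).filterMap (fun p => if p.2 = "#" then none else some p.1)
      = idxs cells s := by
  induction cells generalizing s with
  | nil => simp [PySem.List.enumerate_nil, idxs]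
  | cons c rest ih =>
    have ih' := ih (s + 1)
    simp only [PySem.List.enumerate_cons, List.filterMap_cons, idxs]
    by_cases hc : c = "#" <;> simp [hc, ih']

-- B's inner loop: fold of max gap-minus-one over consecutive pairs
def pairFold (best : Int) (l : List Int) : Int :=
  (l.zip l.tail).foldl (fun b p => max b (p.2 - p.1 - 1)) best

lemma pairFold_cons (best a b : Int) (l : List Int) :
    pairFold best (a :: b :: l) = pairFold (max best (b - a - 1)) (b :: l) := rfl

-- core: B's separator-gap computation equals A's run-extraction scan on one line
lemma core (cells : List String) :
    (∀ (best off e : Int), 0 ≤ best → e = off + cells.length →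
      pairFold best ((off - 1) :: idxs cells off ++ [e]) = scanA cells best)
    ∧ (∀ (best r off e : Int), 1 ≤ r → e = off + cells.length →
      pairFold best ((off - 1 - r) :: idxs cells off ++ [e])
        = scanA (runA cells r).2 (max best (runA cells r).1)) := by
  induction cells with
  | nil =>
    constructor
    · intro best off e hb he
      have h1 : pairFold best ((off - 1) :: idxs [] off ++ [e]) = max best (e - (off - 1) - 1) := rfl
      have h2 : scanA [] best = best := by simp [scanA]
      rw [h1, h2]
      simp at he; omega
    · intro best r off e hr he
      have h1 : pairFold best ((off - 1 - r) :: idxs [] off ++ [e])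
          = max best (e - (off - 1 - r) - 1) := rfl
      have h2 : runA ([] : List String) r = (r, []) := rfl
      rw [h1, h2]
      have h3 : scanA [] (max best r) = max best r := by simp [scanA]
      rw [h3]
      simp at he; omega
  | cons c rest ih =>
    constructor
    · intro best off e hb he
      have he' : e = (off + 1) + (rest.length : Int) := by simp at he; omega
      by_cases hc : c = "#"
      · rw [show idxs (c :: rest) off = idxs rest (off + 1) by simp [idxs, hc]]
        have h1 := ih.2 best 1 (off + 1) e le_rfl he'
        rw [show ((off + 1) - 1 - 1 : Int) = off - 1 by ring] at h1
        rw [h1]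
        simp [scanA, hc]
      · rw [show idxs (c :: rest) off = off :: idxs rest (off + 1) by simp [idxs, hc]]
        rw [List.cons_append, List.cons_append, pairFold_cons,
          show (max best (off - (off - 1) - 1) : Int) = best by omega]
        have h1 := ih.1 best (off + 1) e hb he'
        rw [show ((off + 1) - 1 : Int) = off by ring, List.cons_append] at h1
        rw [h1]
        simp [scanA, hc]
    · intro best r off e hr he
      have he' : e = (off + 1) + (rest.length : Int) := by simp at he; omega
      by_cases hc : c = "#"
      · rw [show idxs (c :: rest) off = idxs rest (off + 1) by simp [idxs, hc]]
        have h1 := ih.2 best (r + 1) (off + 1) e (by omega) he'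
        rw [show ((off + 1) - 1 - (r + 1) : Int) = off - 1 - r by ring] at h1
        rw [h1, show runA (c :: rest) r = runA rest (r + 1) by simp [runA, hc]]
      · rw [show idxs (c :: rest) off = off :: idxs rest (off + 1) by simp [idxs, hc]]
        rw [List.cons_append, List.cons_append, pairFold_cons,
          show (max best (off - (off - 1 - r) - 1) : Int) = max best r by omega]
        have h1 := ih.1 (max best r) (off + 1) e (by omega) he'
        rw [show ((off + 1) - 1 : Int) = off by ring, List.cons_append] at h1
        rw [h1, show runA (c :: rest) r = (r, c :: rest) by simp [runA, hc]]
        simp [scanA, hc]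

lemma scanA_le (cells : List String) (m : Int) : m ≤ scanA cells m := by
  induction cells, m using scanA.induct with
  | case1 m => simp [scanA]
  | case2 c rest m hc p ih =>
    simp only [scanA, hc, if_pos]
    exact le_trans (le_max_left _ _) ih
  | case3 c rest m hc ih =>
    simp only [scanA, hc, if_neg, Bool.false_eq_true, not_false_eq_true]
    exact ih

-- one line of B's outer loop equals scanA
lemma lineBestB_eq (best : Int) (line : List String) (hb : 0 ≤ best) :
    lineBestB best line = scanA line best := by
  have h0 : lineBestB best line
      = pairFold best ((-1 : Int) ::
          ((PySem.List.enumerate line 0).filterMap (fun p => if p.2 = "#" then none else some p.1))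
          ++ [(line.length : Int)]) := rfl
  rw [h0, enum_filter]
  have := (core line).1 best 0 (line.length : Int) hb (by omega)
  rw [show ((0 : Int) - 1) = -1 by ring] at this
  exact this

lemma fold_lines (L : List (List String)) : ∀ b : Int, 0 ≤ b →
    L.foldl lineBestB b = L.foldl (fun m line => scanA line m) b := by
  induction L with
  | nil => intro b _; rfl
  | cons line L ih =>
    intro b hb
    simp only [List.foldl_cons]
    rw [lineBestB_eq b line hb]
    exact ih _ (le_trans hb (scanA_le _ _))

-- ===== VERDICT (by name: the statement is the Claim_ definition above) =====
theorem get_max_border_spec : Claim_equal_get_max_border := by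
  intro matrix _ _
  unfold Spec_get_max_border
  have e1 : get_max_border matrix
      = (((List.range matrix.length).map
            (fun i => (List.range (matrix.headD []).length).map
              (fun j => (matrix.getD i []).getD j ""))) ++
         ((List.range (matrix.headD []).length).map
            (fun j => (List.range matrix.length).map
              (fun i => (matrix.getD i []).getD j "")))).foldl (fun m l => scanA l m) 0 := by
    unfold get_max_border
    rw [List.foldl_append, List.foldl_map, List.foldl_map]
  have e2 : get_max_border_alt matrix
      = (((List.range matrix.length).map
            (fun i => (List.range (matrix.headD []).length).map
              (fun j => (matrix.getD i []).getD j ""))) ++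
         ((List.range (matrix.headD []).length).map
            (fun j => (List.range matrix.length).map
              (fun i => (matrix.getD i []).getD j "")))).foldl lineBestB 0 := rfl
  rw [e1, e2]
  exact (fold_lines _ 0 le_rfl).symm
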